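-- pv_equiv track=rewrite | github.com/rio1004666/Python_PS | 삼성기출/2048(회전활용).py | dfs
-- ===== SOURCE A (Python) =====
-- from copy import deepcopy
--
-- def rotate(n, board):
--     new_board = deepcopy(board)
--     for row in range(n):
--         for col in range(n):
--             new_board[col][n - row - 1] = board[row][col]  # 0,2 가 2.3으로 된다
--     return new_board
--
-- def convert(n, row):
--     new_list = [num for num in row if num != 0]  # 다시 한줄에서 0이 아닌 수만 가져온다
--     # 그런 후에 왼쪽으로 다 붙인 후에 나머지 0으로 채운다.
--     for col in range(1, len(new_list)): # 현재 0이 아닌 숫자들만 뽑은 새로운 리스트에서 합쳐버린다.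
--         if new_list[col - 1] == new_list[col]:
--             new_list[col - 1] = new_list[col] * 2
--             new_list[col] = 0
--     new_list = [num for num in new_list if num != 0]  # 이제 다 합쳐진 줄에서 나머지는 0으로 채운다
--     return new_list + [0] * (n - len(new_list))  # 모두 왼쪽으로 이동후에 나머지는 0으로 채운다. (남은 갯수만큼)
--
-- def dfs(n, board, count):  # 상상을 해라 dfs는 최대한 각 경우의 수 가지들을 상상하면서 인자가 어떻게 넘어가고 반환값은 언제 나와야하는지 확인해야한다.
--     result = max([max(row) for row in board])  # 각 줄마다 최댓값을 가져온 후에 최댓값만 모인 리스트의 최댓값을 다시 구한다.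
--     # 초기 보드판의 최댓값이 생성된다.
--     if count == 0:  # 카운트를 다운시켜서 0이되면 최종적인 최댓값이 결정된다. 이 최종적인 최댓값을 가지고 다른 경우의 수들과 다시 비교해서 최댓값을 구할 것이다.
--         return result
--     for _ in range(4):
--         merged_board = [convert(n, row) for row in board]  # 각 한줄 씩 가져와서 합친다.,
--         result = max(result, dfs(n, merged_board, count - 1))
--         board = rotate(n, board)
--
--     return result
-- ===== SOURCE B (Python) =====
-- from copy import deepcopy
--
--
-- def rotate(n, board):
--     new_board = deepcopy(board)
--     for row in range(n):
--         for col in range(n):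
--             new_board[col][n - row - 1] = board[row][col]
--     return new_board
--
--
-- def merge(nums):
--     # greedy pair-skip scan over the nonzero tiles
--     out = []
--     i = 0
--     while i < len(nums):
--         if i + 1 < len(nums) and nums[i] == nums[i + 1]:
--             out.append(nums[i] * 2)
--             i += 2
--         else:
--             out.append(nums[i])
--             i += 1
--     return out
--
--
-- def convert(n, row):
--     merged = merge([num for num in row if num != 0])
--     return merged + [0] * (n - len(merged))
--
--
-- def dfs(n, board, count):
--     # BFS by levels: frontier holds every board reachable in exactly k moves;
--     # the answer is the running max tile over all levels up to depth count.
--     best = max(v for row in board for v in row)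
--     frontier = [board]
--     for _ in range(count):
--         new_frontier = []
--         for cur in frontier:
--             b = cur
--             for _ in range(4):
--                 new_frontier.append([convert(n, row) for row in b])
--                 b = rotate(n, b)
--         frontier = new_frontier
--         best = max(best, max(v for cur in frontier for row in cur for v in row))
--     return best
-- ===== Notes on version B (the rewrite author's own statement) =====
-- stated objective: alternative
-- what changed: Replaces A's recursive depth-first 4-way search with a breadth-first iteration over explicit per-depth frontier lists accumulating a flattened running max, and replaces A's mark-zero-then-filter indexed merge pass with a greedy pair-skip scan; rotate is kept verbatim.
import Mathlib
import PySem

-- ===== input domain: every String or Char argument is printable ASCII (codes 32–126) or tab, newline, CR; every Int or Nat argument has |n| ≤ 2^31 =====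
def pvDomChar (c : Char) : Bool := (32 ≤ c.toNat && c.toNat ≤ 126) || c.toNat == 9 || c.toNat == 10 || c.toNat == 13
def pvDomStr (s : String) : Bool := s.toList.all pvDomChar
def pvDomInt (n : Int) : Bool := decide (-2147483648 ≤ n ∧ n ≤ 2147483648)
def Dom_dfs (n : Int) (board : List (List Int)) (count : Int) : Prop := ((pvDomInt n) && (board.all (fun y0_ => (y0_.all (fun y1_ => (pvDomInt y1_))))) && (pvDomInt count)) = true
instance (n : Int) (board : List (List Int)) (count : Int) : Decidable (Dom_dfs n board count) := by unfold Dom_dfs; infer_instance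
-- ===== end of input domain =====

-- B replaces A's recursive depth-first 4-way search by a breadth-first iteration over explicit
-- per-depth frontier lists with a flattened running max, and A's mark-zero-then-filter indexed
-- merge pass by a greedy pair-skip scan (alternative decomposition, same cost); rotate is shared.
-- Equivalence is about return values; neither version mutates its arguments.


-- ===== PORT A =====

-- board[i][j] read; exact for in-range indices (Pre_ keeps all accesses in range)
def getCell (b : List (List Int)) (i j : Nat) : Int := (b.getD i []).getD j 0

-- new_board[i][j] = v; exact for in-range indices (Pre_ keeps all accesses in range)
def setCell (b : List (List Int)) (i j : Nat) (v : Int) : List (List Int) :=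
  match b[i]? with
  | some row => b.set i (row.set j v)
  | none => b

-- rotate(n, board): new_board[col][n-row-1] = board[row][col] for row,col in range(n)
def rotateA (n : Int) (board : List (List Int)) : List (List Int) :=
  (PySem.List.pyRange 0 n 1).foldl (fun nb row =>
    (PySem.List.pyRange 0 n 1).foldl (fun nb2 col =>
      setCell nb2 col.toNat (n - row - 1).toNat (getCell board row.toNat col.toNat)) nb) board

-- convert(n, row): A's indexed merge pass over the nonzero tiles
def convertA (n : Int) (row : List Int) : List Int :=
  let nl := row.filter (fun num => num ≠ 0)
  let nl2 := (PySem.List.pyRange 1 (nl.length : Int) 1).foldl (fun l col =>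
    let c := col.toNat
    if l.getD (c - 1) 0 = l.getD c 0 then
      (l.set (c - 1) (l.getD c 0 * 2)).set c 0
    else l) nl
  let nl3 := nl2.filter (fun num => num ≠ 0)
  nl3 ++ List.replicate ((n : Int) - (nl3.length : Int)).toNat 0

-- max(row); Python raises on an empty row (excluded by Pre_), the .getD 0 is unreachable there
def rowMax (row : List Int) : Int := (PySem.List.max? row (fun y => y)).getD 0

-- max([max(row) for row in board]); Python raises on an empty board (excluded by Pre_)
def rowsMax (board : List (List Int)) : Int :=
  (PySem.List.max? (board.map rowMax) (fun y => y)).getD 0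

-- dfs with a fuel parameter (= count.toNat at the top call): Python recurses on count-1 until
-- count == 0; for 0 ≤ count the fuel never runs out, so the fuel-0 branch is unreachable on Pre_
def dfsAux (n : Int) : Nat → List (List Int) → Int → Int
  | fuel, board, count =>
    let result := rowsMax board
    if count = 0 then result
    else
      match fuel with
      | 0 => result
      | Nat.succ f =>
        ((List.range 4).foldl (fun (rb : Int × List (List Int)) _ =>
          (max rb.1 (dfsAux n f (rb.2.map (convertA n)) (count - 1)), rotateA n rb.2))
          (result, board)).1

def dfs (n : Int) (board : List (List Int)) (count : Int) : Int :=
  dfsAux n count.toNat board count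

-- ===== PORT B =====

-- merge(nums): while i < len(nums): pair-skip scan building out (i is the scan index)
def mergeB (nums : List Int) (out : List Int) (i : Nat) : List Int :=
  if _ : i < nums.length then
    if i + 1 < nums.length ∧ nums.getD i 0 = nums.getD (i + 1) 0 then
      mergeB nums (out ++ [nums.getD i 0 * 2]) (i + 2)
    else
      mergeB nums (out ++ [nums.getD i 0]) (i + 1)
  else out
termination_by nums.length - i

-- convert(n, row) of B: merge the nonzero tiles, then pad with zeros on the right
def convertB (n : Int) (row : List Int) : List Int :=
  let merged := mergeB (row.filter (fun num => num ≠ 0)) [] 0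
  merged ++ List.replicate ((n : Int) - (merged.length : Int)).toNat 0

-- one BFS level: for each frontier board cur, append its four merged children, rotating cur
-- between pushes (b = cur; 4 times: append [convert(n,row) for row in b]; b = rotate(n, b))
def levelStep (n : Int) (frontier : List (List (List Int))) : List (List (List Int)) :=
  frontier.foldl (fun nf cur =>
    ((List.range 4).foldl
      (fun (p : List (List (List Int)) × List (List Int)) _ =>
        (p.1 ++ [p.2.map (convertB n)], rotateA n p.2))
      (nf, cur)).1) []

def dfs_alt (n : Int) (board : List (List Int)) (count : Int) : Int :=
  let best := (PySem.List.max? (board.flatMap (fun row => row)) (fun y => y)).getD 0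
  ((PySem.List.pyRange 0 count 1).foldl
    (fun (st : List (List (List Int)) × Int) _ =>
      let f := levelStep n st.1
      (f, max st.2 ((PySem.List.max? (f.flatMap (fun cur => cur.flatMap (fun row => row))) (fun y => y)).getD 0)))
    ([board], best)).2

-- ===== PRECONDITION & SPEC =====
-- Pre_ excludes exactly the inputs where Python A raises or recurses forever: an empty board or
-- an empty row (max([]) raises ValueError), count < 0 (unbounded recursion, RecursionError), and,
-- when count > 0: for n ≥ 1 a board whose top-left n×n block is missing (rotate's index
-- assignments raise IndexError), and for n ≤ 0 a row with no nonzero tile (convert strips it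
-- empty and the next level's max([]) raises ValueError).
def Pre_dfs (n : Int) (board : List (List Int)) (count : Int) : Prop :=
  board ≠ [] ∧ (∀ row ∈ board, row ≠ []) ∧ 0 ≤ count ∧
    (0 < count →
      (1 ≤ n → n ≤ (board.length : Int) ∧ ∀ row ∈ board.take n.toNat, n ≤ (row.length : Int)) ∧
      (n ≤ 0 → ∀ row ∈ board, ∃ x ∈ row, x ≠ 0))
instance (n : Int) (board : List (List Int)) (count : Int) : Decidable (Pre_dfs n board count) := by
  unfold Pre_dfs; infer_instance

def pvWitness_dfs : Int × List (List Int) × Int := (2, [[2, 0], [0, 2]], 1)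

def Spec_dfs (n : Int) (board : List (List Int)) (count : Int) (out : Int) : Prop := out = dfs_alt n board count
instance (n : Int) (board : List (List Int)) (count : Int) (out : Int) : Decidable (Spec_dfs n board count out) := by unfold Spec_dfs; infer_instance

-- ===== CLAIM =====
def Claim_equal_dfs : Prop := ∀ (n : Int) (board : List (List Int)) (count : Int), Dom_dfs n board count → Pre_dfs n board count → Spec_dfs n board count (dfs n board count)

-- ===== LEMMAS AND PROOFS =====

-- clean recursive form of both merge passes: greedy left-to-right pairing
def mergeR : List Int → List Int
  | [] => []
  | [a] => [a]
  | a :: b :: t => if a = b then a * 2 :: mergeR t else a :: mergeR (b :: t)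

-- A's merge pass, recast with the previous value threaded (0 right after a merge)
def passP (p : Int) : List Int → List Int
  | [] => [p]
  | x :: t => if p = x then x * 2 :: passP 0 t else p :: passP x t

-- max of a nonempty list as the running-max loop (0 on [], unreachable where used)
def nmax : List Int → Int
  | [] => 0
  | x :: t => t.foldl max x

-- ---- max-fold algebra ----
theorem lmax_max_comm (l : List Int) : ∀ (a b : Int), l.foldl max (max a b) = max a (l.foldl max b) := by
  induction l with
  | nil => intro a b; simp
  | cons x t ih => intro a b; simp only [List.foldl_cons]; rw [max_assoc, ih]

theorem lmax_max (l : List Int) (a b : Int) : l.foldl max (max a b) = max (l.foldl max a) b := by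
  rw [max_comm a b, lmax_max_comm, max_comm]

theorem nmax_cons (x : Int) (l : List Int) (h : l ≠ []) : nmax (x :: l) = max x (nmax l) := by
  match l, h with
  | y :: t, _ => simp only [nmax, List.foldl_cons]; rw [lmax_max_comm]

theorem nmax_append (l1 l2 : List Int) (h1 : l1 ≠ []) (h2 : l2 ≠ []) :
    nmax (l1 ++ l2) = max (nmax l1) (nmax l2) := by
  match l1, h1, l2, h2 with
  | x :: t, _, y :: s2, _ =>
    simp only [nmax, List.cons_append, List.foldl_cons, List.foldl_append]
    rw [lmax_max_comm]

theorem le_nmax_of_mem {x : Int} {l : List Int} (h : x ∈ l) : x ≤ nmax l := by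
  match l, h with
  | x :: t, h =>
    simp only [nmax]
    rcases List.mem_cons.mp h with h | h
    · subst h; exact (PySem.List.le_foldl_max t x).1
    · exact (PySem.List.le_foldl_max t x).2 _ h

theorem nmax_le_of_forall {l : List Int} {d : Int} (h : l ≠ []) (hb : ∀ x ∈ l, x ≤ d) : nmax l ≤ d := by
  match l, h with
  | x :: t, _ =>
    simp only [nmax]
    rcases PySem.List.foldl_max_mem t x with h | h
    · rw [h]; exact hb x (by simp)
    · exact hb _ (List.mem_cons_of_mem _ h)

theorem lmax_of_le {l : List Int} {d : Int} (hb : ∀ x ∈ l, x ≤ d) : l.foldl max d = d := by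
  rcases PySem.List.foldl_max_mem l d with h | h
  · exact h
  · exact le_antisymm (hb _ h) (PySem.List.le_foldl_max l d).1

theorem lmax_mono {a b : Int} (l : List Int) (h : a ≤ b) : l.foldl max a ≤ l.foldl max b := by
  induction l generalizing a b with
  | nil => exact h
  | cons x t ih => simp only [List.foldl_cons]; exact ih (max_le_max h le_rfl)

theorem lmax_absorb {r a : Int} (l : List Int) (h : r ≤ a) : max a (l.foldl max r) = l.foldl max a := by
  apply le_antisymm
  · apply max_le
    · exact (PySem.List.le_foldl_max l a).1
    · exact lmax_mono l h
  · rcases PySem.List.foldl_max_mem l a with he | he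
    · rw [he]; exact le_max_left _ _
    · exact le_trans ((PySem.List.le_foldl_max l r).2 _ he) (le_max_right _ _)

theorem maxD0_eq_nmax (l : List Int) : (PySem.List.max? l (fun y => y)).getD 0 = nmax l := by
  cases l with
  | nil => simp [nmax, PySem.List.max?]
  | cons x t => rw [PySem.List.max?_id_cons]; rfl

theorem rowMax_eq_nmax (r : List Int) : rowMax r = nmax r := by
  rw [rowMax, maxD0_eq_nmax]

theorem rowsMax_eq_nmax (b : List (List Int)) : rowsMax b = nmax (b.map nmax) := by
  rw [rowsMax, maxD0_eq_nmax]
  congr 1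
  exact List.map_congr_left (fun r _ => rowMax_eq_nmax r)

-- flattened max = max of per-piece maxes, for a nonempty list of nonempty pieces
theorem nmax_flat (L : List (List Int)) (h : L ≠ []) (hp : ∀ p ∈ L, p ≠ []) :
    nmax (L.flatMap (fun r => r)) = nmax (L.map nmax) := by
  induction L with
  | nil => exact absurd rfl h
  | cons p L' ih =>
    cases L' with
    | nil => simp [nmax]
    | cons q L'' =>
      have hp' : p ≠ [] := hp p (by simp)
      have hq : q ≠ [] := hp q (by simp)
      have hflat : (q :: L'').flatMap (fun r => r) ≠ [] := by
        cases q with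
        | nil => exact absurd rfl hq
        | cons a t => simp
      have h1 : (p :: q :: L'').flatMap (fun r => r) = p ++ ((q :: L'').flatMap (fun r => r)) := by
        simp
      rw [h1, nmax_append _ _ hp' hflat,
        ih (by simp) (fun r hr => hp r (List.mem_cons_of_mem _ hr)),
        show List.map nmax (p :: q :: L'') = nmax p :: List.map nmax (q :: L'') from rfl,
        nmax_cons _ _ (by simp)]

-- ---- merge equivalence ----
theorem mergeB_eq_mergeR (nums : List Int) : ∀ (i : Nat) (out : List Int),
    mergeB nums out i = out ++ mergeR (nums.drop i) := by
  suffices h : ∀ (m i : Nat), nums.length - i ≤ m → ∀ out, mergeB nums out i = out ++ mergeR (nums.drop i) by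
    intro i out; exact h nums.length i (Nat.sub_le _ _) out
  intro m
  induction m with
  | zero =>
    intro i hle out
    have h1 : ¬ i < nums.length := by omega
    rw [mergeB]
    simp [h1, List.drop_eq_nil_of_le (by omega : nums.length ≤ i), mergeR]
  | succ m ih =>
    intro i hle out
    rw [mergeB]
    by_cases h1 : i < nums.length
    · simp only [h1, dif_pos]
      have hdrop : nums.drop i = nums[i] :: nums.drop (i + 1) := List.drop_eq_getElem_cons h1
      have hgi : nums.getD i 0 = nums[i] := List.getD_eq_getElem nums 0 h1
      by_cases h2 : i + 1 < nums.length ∧ nums.getD i 0 = nums.getD (i + 1) 0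
      · have hdrop2 : nums.drop (i + 1) = nums[i + 1] :: nums.drop (i + 2) := List.drop_eq_getElem_cons h2.1
        have hgi2 : nums.getD (i + 1) 0 = nums[i + 1] := List.getD_eq_getElem nums 0 h2.1
        rw [if_pos h2, ih (i + 2) (by omega), hdrop, hdrop2, hgi]
        have heq : nums[i] = nums[i + 1] := by rw [← hgi, ← hgi2]; exact h2.2
        simp [mergeR, ← heq]
      · rw [if_neg h2, ih (i + 1) (by omega), hdrop, hgi]
        rcases Nat.lt_or_ge (i + 1) nums.length with hlt | hge
        · have hne : nums[i] ≠ nums[i + 1] := by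
            intro he
            exact h2 ⟨hlt, by rw [List.getD_eq_getElem nums 0 h1, List.getD_eq_getElem nums 0 hlt, he]⟩
          rw [List.drop_eq_getElem_cons hlt]
          simp [mergeR, hne]
        · rw [List.drop_eq_nil_of_le hge]
          simp [mergeR]
    · simp only [h1, dif_neg, not_false_iff]
      rw [List.drop_eq_nil_of_le (by omega : nums.length ≤ i)]
      simp [mergeR]

theorem pass_fold : ∀ (rest pre : List Int) (p : Int),
    (PySem.List.pyRange ((pre.length : Int) + 1) ((pre.length : Int) + 1 + (rest.length : Int)) 1).foldl
      (fun l col =>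
        let c := col.toNat
        if l.getD (c - 1) 0 = l.getD c 0 then
          (l.set (c - 1) (l.getD c 0 * 2)).set c 0
        else l) (pre ++ p :: rest) = pre ++ passP p rest := by
  intro rest
  induction rest with
  | nil =>
    intro pre p
    rw [PySem.List.pyRange_one]
    simp [passP]
  | cons x t ih =>
    intro pre p
    have hab : ((pre.length : Int) + 1) < (pre.length : Int) + 1 + ((x :: t).length : Int) := by
      simp only [List.length_cons]; push_cast; omega
    rw [PySem.List.pyRange_one_cons hab]
    simp only [List.foldl_cons]
    have hc : (((pre.length : Int) + 1)).toNat = pre.length + 1 := by omega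
    have hget1 : (pre ++ p :: x :: t).getD (pre.length + 1 - 1) 0 = p := by
      simp [List.getD_eq_getElem?_getD]
    have hget2 : (pre ++ p :: x :: t).getD (pre.length + 1) 0 = x := by
      simp [List.getD_eq_getElem?_getD]
    simp only [hc, hget1, hget2]
    by_cases hpx : p = x
    · rw [if_pos hpx]
      have hset : ((pre ++ p :: x :: t).set (pre.length + 1 - 1) (x * 2)).set (pre.length + 1) 0
          = (pre ++ [x * 2]) ++ (0 : Int) :: t := by
        simp
      rw [hset]
      have hr : PySem.List.pyRange ((pre.length : Int) + 1 + 1)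
            ((pre.length : Int) + 1 + ((x :: t).length : Int)) 1
          = PySem.List.pyRange (((pre ++ [x * 2]).length : Int) + 1)
            (((pre ++ [x * 2]).length : Int) + 1 + (t.length : Int)) 1 := by
        congr 1
        · simp
        · simp
          omega
      rw [hr, ih (pre ++ [x * 2]) 0]
      simp [passP, hpx]
    · rw [if_neg hpx]
      have hstate : pre ++ p :: x :: t = (pre ++ [p]) ++ x :: t := by simp
      rw [hstate]
      have hr : PySem.List.pyRange ((pre.length : Int) + 1 + 1)
            ((pre.length : Int) + 1 + ((x :: t).length : Int)) 1
          = PySem.List.pyRange (((pre ++ [p]).length : Int) + 1)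
            (((pre ++ [p]).length : Int) + 1 + (t.length : Int)) 1 := by
        congr 1
        · simp
        · simp
          omega
      rw [hr, ih (pre ++ [p]) x]
      simp [passP, hpx]

theorem filter_passP : ∀ (l : List Int), (∀ x ∈ l, x ≠ 0) → ∀ (p : Int),
    (passP p l).filter (fun num => num ≠ 0) = if p = 0 then mergeR l else mergeR (p :: l) := by
  intro l
  induction l with
  | nil =>
    intro h p
    by_cases hp : p = 0 <;> simp [passP, mergeR, hp]
  | cons x t ih =>
    intro h p
    have hx : x ≠ 0 := h x (by simp)
    have ht : ∀ y ∈ t, y ≠ 0 := fun y hy => h y (List.mem_cons_of_mem _ hy)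
    by_cases hpx : p = x
    · subst hpx
      rw [show passP p (p :: t) = p * 2 :: passP 0 t from by simp [passP], List.filter_cons,
        ih ht 0]
      simp [mergeR, hx]
    · simp only [passP, if_neg hpx, List.filter_cons]
      rw [ih ht x]
      by_cases hp : p = 0 <;> simp [hp, hx, mergeR, hpx]

theorem convert_eq (n : Int) (row : List Int) : convertA n row = convertB n row := by
  simp only [convertA, convertB]
  have hmb : mergeB (row.filter (fun num => num ≠ 0)) [] 0
      = mergeR (row.filter (fun num => num ≠ 0)) := by
    simpa using mergeB_eq_mergeR (row.filter (fun num => num ≠ 0)) 0 []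
  have hnz : ∀ x ∈ row.filter (fun num => num ≠ 0), x ≠ 0 := by
    intro x hx
    simpa using (List.mem_filter.mp hx).2
  rw [hmb]
  cases hnlc : row.filter (fun num => num ≠ 0) with
  | nil =>
    rw [PySem.List.pyRange_one]
    simp [mergeR]
  | cons hh tt =>
    have hh0 : hh ≠ 0 := by
      have := hnz hh (by rw [hnlc]; simp)
      exact this
    have htt : ∀ x ∈ tt, x ≠ 0 := by
      intro x hx
      exact hnz x (by rw [hnlc]; exact List.mem_cons_of_mem _ hx)
    have hr : PySem.List.pyRange 1 (((hh :: tt).length : Int)) 1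
        = PySem.List.pyRange ((([] : List Int).length : Int) + 1)
            ((([] : List Int).length : Int) + 1 + (tt.length : Int)) 1 := by
      congr 1
      all_goals simp
      all_goals exact add_comm _ _
    rw [hr, show (hh :: tt) = ([] : List Int) ++ hh :: tt from rfl, pass_fold tt [] hh]
    rw [show ([] : List Int) ++ passP hh tt = passP hh tt from rfl]
    rw [filter_passP tt htt hh, if_neg hh0]
    simp

theorem mergeR_nonzero : ∀ (l : List Int), (∀ x ∈ l, x ≠ 0) → ∀ y ∈ mergeR l, y ≠ 0 := by
  intro l
  induction l using mergeR.induct with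
  | case1 => simp [mergeR]
  | case2 a => intro h; simpa [mergeR] using h
  | case3 b t ih =>
    intro h y hy
    rw [show mergeR (b :: b :: t) = b * 2 :: mergeR t from by simp [mergeR]] at hy
    rcases List.mem_cons.mp hy with hy | hy
    · subst hy
      have hb : b ≠ 0 := h b (by simp)
      intro hc
      exact hb (by omega)
    · exact ih (fun x hx => h x (by simp [hx])) y hy
  | case4 a b t hab ih =>
    intro h y hy
    rw [show mergeR (a :: b :: t) = a :: mergeR (b :: t) from by simp [mergeR, hab]] at hy
    rcases List.mem_cons.mp hy with hy | hy
    · subst hy; exact h _ (by simp)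
    · exact ih (fun x hx => h x (by simp at hx ⊢; tauto)) y hy

theorem mergeR_ne_nil : ∀ (l : List Int), l ≠ [] → mergeR l ≠ [] := by
  intro l hl
  match l with
  | [a] => simp [mergeR]
  | a :: b :: t =>
    simp only [mergeR]
    split <;> simp

-- ---- rotate shape ----
theorem setCell_map_length (b : List (List Int)) (i j : Nat) (v : Int) :
    (setCell b i j v).map List.length = b.map List.length := by
  induction b generalizing i with
  | nil => rfl
  | cons r t ih =>
    cases i with
    | zero => simp [setCell]
    | succ i =>
      simp only [setCell, List.getElem?_cons_succ]
      cases h : t[i]? with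
      | none => rfl
      | some row =>
        have hrec := ih (i := i)
        simp only [setCell, h] at hrec
        simp only [List.set_cons_succ, List.map_cons, hrec]

theorem rotate_map_length (n : Int) (b : List (List Int)) :
    (rotateA n b).map List.length = b.map List.length := by
  have hstep : ∀ (f : List (List Int) → Int → List (List Int)),
      (∀ s x, (f s x).map List.length = s.map List.length) →
      ∀ (l : List Int) (s : List (List Int)), ((l.foldl f s).map List.length) = s.map List.length := by
    intro f hf l
    induction l with
    | nil => intro s; rfl
    | cons x t ih => intro s; simp only [List.foldl_cons]; rw [ih, hf]
  unfold rotateA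
  apply hstep
  intro s row
  apply hstep
  intro s2 col
  exact setCell_map_length _ _ _ _

theorem rotate_nonpos (n : Int) (hn : n ≤ 0) (b : List (List Int)) : rotateA n b = b := by
  unfold rotateA
  rw [PySem.List.pyRange_one]
  have h0 : n.toNat = 0 := by omega
  simp [h0]

-- ---- the invariant carried by every board the search visits ----
def BoardInv (n : Int) (b : List (List Int)) : Prop :=
  b ≠ [] ∧ (∀ r ∈ b, r ≠ []) ∧
    (1 ≤ n → n ≤ (b.length : Int) ∧ ∀ row ∈ b.take n.toNat, n ≤ (row.length : Int)) ∧
    (n ≤ 0 → ∀ r ∈ b, ∃ x ∈ r, x ≠ 0)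

theorem rot_inv {n : Int} {b : List (List Int)} (h : BoardInv n b) : BoardInv n (rotateA n b) := by
  obtain ⟨hne, hrows, hshape, hnz⟩ := h
  have hlen := rotate_map_length n b
  have hL : (rotateA n b).length = b.length := by
    have := congrArg List.length hlen
    simpa using this
  refine ⟨?_, ?_, ?_, ?_⟩
  · intro hc
    apply hne
    rw [← List.length_eq_zero_iff] at hc ⊢
    omega
  · intro r hr
    have hmem : r.length ∈ b.map List.length := hlen ▸ List.mem_map_of_mem hr
    obtain ⟨r0, hr0, he⟩ := List.mem_map.mp hmem
    intro hc
    apply hrows r0 hr0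
    rw [← List.length_eq_zero_iff] at hc ⊢
    omega
  · intro hn1
    refine ⟨by rw [hL]; exact (hshape hn1).1, ?_⟩
    intro row hrow
    have hmem : row.length ∈ ((rotateA n b).take n.toNat).map List.length :=
      List.mem_map_of_mem hrow
    rw [List.map_take, hlen, ← List.map_take] at hmem
    obtain ⟨r0, hr0, he⟩ := List.mem_map.mp hmem
    have := (hshape hn1).2 r0 hr0
    omega
  · intro hn
    rw [rotate_nonpos n hn]
    exact hnz hn

theorem conv_inv {n : Int} {b : List (List Int)} (h : BoardInv n b) : BoardInv n (b.map (convertA n)) := by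
  obtain ⟨hne, hrows, hshape, hnz⟩ := h
  have hlen : ∀ r : List Int, (convertA n r).length
      = (mergeB (r.filter (fun num => num ≠ 0)) [] 0).length
        + ((n : Int) - ((mergeB (r.filter (fun num => num ≠ 0)) [] 0).length : Int)).toNat := by
    intro r
    rw [convert_eq]
    simp [convertB]
  have hform : ∀ r : List Int, convertA n r
      = mergeR (r.filter (fun num => num ≠ 0))
        ++ List.replicate ((n : Int) - ((mergeR (r.filter (fun num => num ≠ 0))).length : Int)).toNat 0 := by
    intro r
    rw [convert_eq]
    simp only [convertB]
    rw [show mergeB (r.filter (fun num => num ≠ 0)) [] 0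
        = mergeR (r.filter (fun num => num ≠ 0)) from by
      simpa using mergeB_eq_mergeR (r.filter (fun num => num ≠ 0)) 0 []]
  have hlen2 : ∀ r : List Int, ((convertA n r).length : Int)
      = ((mergeR (r.filter (fun num => num ≠ 0))).length : Int)
        + (((n : Int) - ((mergeR (r.filter (fun num => num ≠ 0))).length : Int)).toNat : Int) := by
    intro r
    rw [hform r]
    push_cast [List.length_append, List.length_replicate]
    ring
  have hnzrow : ∀ r : List Int, (∃ x ∈ r, x ≠ 0) → ∃ x ∈ convertA n r, x ≠ 0 := by
    intro r ⟨x, hxr, hx0⟩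
    have hmemf : x ∈ r.filter (fun num => num ≠ 0) := List.mem_filter.mpr ⟨hxr, by simpa using hx0⟩
    have hfne : r.filter (fun num => num ≠ 0) ≠ [] := List.ne_nil_of_mem hmemf
    have hmne := mergeR_ne_nil _ hfne
    obtain ⟨y, hy⟩ := List.exists_mem_of_ne_nil _ hmne
    refine ⟨y, ?_, ?_⟩
    · rw [hform r]
      exact List.mem_append_left _ hy
    · exact mergeR_nonzero _ (fun z hz => by simpa using (List.mem_filter.mp hz).2) y hy
  refine ⟨by simpa using hne, ?_, ?_, ?_⟩
  · intro r' hr'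
    obtain ⟨r, hr, rfl⟩ := List.mem_map.mp hr'
    rcases le_or_gt 1 n with hn1 | hn1
    · intro hc
      have := hlen2 r
      rw [hc] at this
      simp at this
      omega
    · have hn0 : n ≤ 0 := by omega
      obtain ⟨y, hy, _⟩ := hnzrow r (hnz hn0 r hr)
      exact List.ne_nil_of_mem hy
  · intro hn1
    refine ⟨by simpa using (hshape hn1).1, ?_⟩
    intro row hrow
    have : row ∈ b.map (convertA n) := List.mem_of_mem_take hrow
    obtain ⟨r, hr, rfl⟩ := List.mem_map.mp this
    have := hlen2 r
    omega
  · intro hn0 r' hr'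
    obtain ⟨r, hr, rfl⟩ := List.mem_map.mp hr'
    exact hnzrow r (hnz hn0 r hr)

def children (n : Int) (b : List (List Int)) : List (List (List Int)) :=
  [b.map (convertA n), (rotateA n b).map (convertA n),
   (rotateA n (rotateA n b)).map (convertA n),
   (rotateA n (rotateA n (rotateA n b))).map (convertA n)]

theorem children_inv {n : Int} {b : List (List Int)} (h : BoardInv n b) :
    ∀ c ∈ children n b, BoardInv n c := by
  intro c hc
  simp only [children, List.mem_cons, List.not_mem_nil, or_false] at hc
  rcases hc with rfl | rfl | rfl | rfl
  · exact conv_inv h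
  · exact conv_inv (rot_inv h)
  · exact conv_inv (rot_inv (rot_inv h))
  · exact conv_inv (rot_inv (rot_inv (rot_inv h)))

-- ---- A's recursion as the depth-indexed spec G ----
def G (n : Int) : Nat → List (List Int) → Int
  | 0, b => rowsMax b
  | k + 1, b => ((children n b).map (G n k)).foldl max (rowsMax b)

theorem G_ge (n : Int) (k : Nat) (b : List (List Int)) : rowsMax b ≤ G n k b := by
  cases k with
  | zero => exact le_refl _
  | succ k => exact (PySem.List.le_foldl_max _ _).1

theorem dfsAux_eq_G (n : Int) : ∀ (k : Nat) (c : Int), 0 ≤ c → c.toNat = k →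
    ∀ (b : List (List Int)), dfsAux n k b c = G n k b := by
  intro k
  induction k with
  | zero =>
    intro c hc hk b
    have hc0 : c = 0 := by omega
    subst hc0
    rw [dfsAux]
    simp [G]
  | succ k ih =>
    intro c hc hk b
    have hcne : ¬ c = 0 := by omega
    have hc1 : (c - 1).toNat = k := by omega
    have hc1n : (0 : Int) ≤ c - 1 := by omega
    rw [dfsAux]
    simp only [if_neg hcne]
    rw [show List.range 4 = [0, 1, 2, 3] from rfl]
    simp only [List.foldl_cons, List.foldl_nil]
    rw [ih (c - 1) hc1n hc1, ih (c - 1) hc1n hc1, ih (c - 1) hc1n hc1, ih (c - 1) hc1n hc1]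
    simp [G, children]

-- ---- B's loop ----
theorem levelStep_eq (n : Int) : ∀ (F acc0 : List (List (List Int))),
    F.foldl (fun nf cur =>
      ((List.range 4).foldl
        (fun (p : List (List (List Int)) × List (List Int)) _ =>
          (p.1 ++ [p.2.map (convertB n)], rotateA n p.2))
        (nf, cur)).1) acc0 = acc0 ++ F.flatMap (children n) := by
  intro F
  induction F with
  | nil => intro acc0; simp
  | cons cur F' ih =>
    intro acc0
    have hcv : convertB n = convertA n := funext fun r => (convert_eq n r).symm
    have hhead : ((List.range 4).foldl
        (fun (p : List (List (List Int)) × List (List Int)) _ =>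
          (p.1 ++ [p.2.map (convertB n)], rotateA n p.2)) (acc0, cur)).1
        = acc0 ++ children n cur := by
      rw [show List.range 4 = [0, 1, 2, 3] from rfl]
      simp only [List.foldl_cons, List.foldl_nil]
      simp [children, hcv, List.append_assoc]
    simp only [List.foldl_cons]
    rw [hhead, ih]
    simp [List.append_assoc]

def repB (n : Int) : Nat → List (List (List Int)) × Int → List (List (List Int)) × Int
  | 0, st => st
  | k + 1, st =>
      let f := levelStep n st.1
      repB n k (f, max st.2 ((PySem.List.max? (f.flatMap (fun cur => cur.flatMap (fun row => row))) (fun y => y)).getD 0))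

theorem foldl_const_rep (n : Int) (l : List Int) : ∀ (st : List (List (List Int)) × Int),
    l.foldl (fun st _ =>
      let f := levelStep n st.1
      (f, max st.2 ((PySem.List.max? (f.flatMap (fun cur => cur.flatMap (fun row => row))) (fun y => y)).getD 0))) st
      = repB n l.length st := by
  induction l with
  | nil => intro st; rfl
  | cons x t ih =>
    intro st
    simp only [List.foldl_cons, List.length_cons, repB]
    exact ih _

theorem flatMax_frontier (F : List (List (List Int))) (h : F ≠ [])
    (hb : ∀ c ∈ F, c ≠ [] ∧ ∀ r ∈ c, r ≠ []) :
    nmax (F.flatMap (fun cur => cur.flatMap (fun row => row))) = nmax (F.map rowsMax) := by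
  have hcells : ∀ c ∈ F, c.flatMap (fun row => row) ≠ [] := by
    intro c hc
    obtain ⟨hcne, hcrows⟩ := hb c hc
    match c, hcne with
    | r :: ct, _ =>
      have hrne : r ≠ [] := hcrows r (by simp)
      match r, hrne with
      | x :: rt, _ => simp
  have h1 : F.flatMap (fun cur => cur.flatMap (fun row => row))
      = (F.map (fun cur => cur.flatMap (fun row => row))).flatMap (fun r => r) := by
    rw [List.flatMap_map]
  rw [h1, nmax_flat _ (by simpa using h) (by
    intro p hp
    obtain ⟨c, hc, rfl⟩ := List.mem_map.mp hp
    exact hcells c hc)]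
  rw [List.map_map]
  congr 1
  apply List.map_congr_left
  intro c hc
  obtain ⟨hcne, hcrows⟩ := hb c hc
  simp only [Function.comp]
  rw [nmax_flat c hcne hcrows, rowsMax_eq_nmax]

theorem lmax_flatMap_children (n : Int) (k : Nat) : ∀ (F : List (List (List Int))) (acc : Int),
    (∀ f ∈ F, rowsMax f ≤ acc) →
    ((F.flatMap (children n)).map (G n k)).foldl max acc = (F.map (G n (k + 1))).foldl max acc := by
  intro F
  induction F with
  | nil => intro acc _; rfl
  | cons f F' ih =>
    intro acc hacc
    rw [show ((f :: F').flatMap (children n)).map (G n k)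
        = (children n f).map (G n k) ++ (F'.flatMap (children n)).map (G n k) from by simp]
    rw [List.foldl_append]
    have habs : max acc (G n (k + 1) f) = ((children n f).map (G n k)).foldl max acc := by
      rw [show G n (k + 1) f = ((children n f).map (G n k)).foldl max (rowsMax f) from rfl]
      exact lmax_absorb _ (hacc f (by simp))
    rw [show (f :: F').map (G n (k + 1)) = G n (k + 1) f :: F'.map (G n (k + 1)) from rfl]
    simp only [List.foldl_cons]
    rw [habs]
    exact ih _ (fun f' hf' =>
      le_trans (hacc f' (by simp [hf'])) (PySem.List.le_foldl_max _ _).1)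

theorem loop_main (n : Int) : ∀ (k : Nat) (F : List (List (List Int))) (best : Int),
    F ≠ [] → (0 < k → ∀ f ∈ F, BoardInv n f) → (∀ f ∈ F, rowsMax f ≤ best) →
    (repB n k (F, best)).2 = (F.map (G n k)).foldl max best := by
  intro k
  induction k with
  | zero =>
    intro F best hF hBoardInv hb
    simp only [repB]
    symm
    apply lmax_of_le
    intro x hx
    obtain ⟨f, hf, rfl⟩ := List.mem_map.mp hx
    exact hb f hf
  | succ k ih =>
    intro F best hF hBoardInv hb
    have hBoardInvF := hBoardInv (Nat.succ_pos k)
    have hLS : levelStep n F = F.flatMap (children n) := by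
      unfold levelStep
      simpa using levelStep_eq n F []
    have hFne' : F.flatMap (children n) ≠ [] := by
      match F, hF with
      | f :: F2, _ => simp [children]
    have hBoardInvF' : ∀ f' ∈ F.flatMap (children n), BoardInv n f' := by
      intro f' hf'
      obtain ⟨f, hf, hmem⟩ := List.mem_flatMap.mp hf'
      exact children_inv (hBoardInvF f hf) f' hmem
    have hfront : ((PySem.List.max? ((F.flatMap (children n)).flatMap
        (fun cur => cur.flatMap (fun row => row))) (fun y => y)).getD 0)
        = nmax ((F.flatMap (children n)).map rowsMax) := by
      rw [maxD0_eq_nmax]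
      exact flatMax_frontier _ hFne' (fun c hc => ⟨(hBoardInvF' c hc).1, (hBoardInvF' c hc).2.1⟩)
    simp only [repB, hLS, hfront]
    have hb' : ∀ f' ∈ F.flatMap (children n), rowsMax f'
        ≤ max best (nmax ((F.flatMap (children n)).map rowsMax)) := by
      intro f' hf'
      exact le_trans (le_nmax_of_mem (List.mem_map_of_mem hf')) (le_max_right _ _)
    rw [ih _ _ hFne' (fun _ => hBoardInvF') hb']
    rw [lmax_max]
    have hMle : nmax ((F.flatMap (children n)).map rowsMax)
        ≤ ((F.flatMap (children n)).map (G n k)).foldl max best := by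
      apply nmax_le_of_forall (by simpa using hFne')
      intro x hx
      obtain ⟨f', hf', rfl⟩ := List.mem_map.mp hx
      exact le_trans (G_ge n k f')
        ((PySem.List.le_foldl_max _ _).2 _ (List.mem_map_of_mem hf'))
    rw [max_eq_left hMle]
    exact lmax_flatMap_children n k F best hb

-- ===== VERDICT =====
theorem dfs_spec : Claim_equal_dfs := by
  intro n board count _ hPre
  obtain ⟨hbne, hrows, hc0, hsh⟩ := hPre
  unfold Spec_dfs
  simp only [dfs, dfs_alt]
  rw [foldl_const_rep]
  have hbest0 : (PySem.List.max? (board.flatMap (fun row => row)) (fun y => y)).getD 0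
      = rowsMax board := by
    rw [maxD0_eq_nmax, nmax_flat board hbne hrows, ← rowsMax_eq_nmax]
  rw [hbest0]
  have hlenr : (PySem.List.pyRange 0 count 1).length = count.toNat := by
    rw [PySem.List.length_pyRange_one]
    omega
  rw [hlenr]
  rw [loop_main n count.toNat [board] (rowsMax board) (by simp)
      (fun hk0 => by
        intro f hf
        simp only [List.mem_singleton] at hf
        subst hf
        have hcpos : 0 < count := by omega
        exact ⟨hbne, hrows, (hsh hcpos).1, (hsh hcpos).2⟩)
      (by intro f hf; simp only [List.mem_singleton] at hf; subst hf; exact le_refl _)]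
  rw [dfsAux_eq_G n count.toNat count hc0 rfl]
  simp only [List.map_cons, List.map_nil, List.foldl_cons, List.foldl_nil]
  exact (max_eq_right (G_ge n count.toNat board)).symm
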